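-- pv_equiv track=rewrite | github.com/bc36/leetcode | Python/lc2500_2599.py | captureForts
-- ===== SOURCE A (Python) =====
-- from typing import List, Optional, Tuple
--
-- def captureForts(forts: List[int]) -> int:
--     p = ans = t = 0
--     for v in forts:
--         if v == 0:
--             t += 1
--         elif v == 1:
--             if p < 0:
--                 ans = max(ans, t)
--             p = 1
--             t = 0
--         else:
--             if p > 0:
--                 ans = max(ans, t)
--             p = -1
--             t = 0
--     return ans
-- ===== SOURCE B (Python) =====
-- def captureForts(forts):
--     # phase 1: index table of non-zero entries; phase 2: pairwise scan
--     nz = [(i, v) for i, v in enumerate(forts) if v != 0]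
--     ans = 0
--     for (i, a), (j, b) in zip(nz, nz[1:]):
--         if (a == 1) != (b == 1):
--             ans = max(ans, j - i - 1)
--     return ans
-- ===== Notes on version B (the rewrite author's own statement) =====
-- stated objective: alternative
-- what changed: Replaces A's single-pass state machine (last-army sign + running zero counter) with two explicit phases: collect the (index,value) list of non-zero forts, then scan consecutive pairs and take j-i-1 for opposite-sign pairs.
import Mathlib
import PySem

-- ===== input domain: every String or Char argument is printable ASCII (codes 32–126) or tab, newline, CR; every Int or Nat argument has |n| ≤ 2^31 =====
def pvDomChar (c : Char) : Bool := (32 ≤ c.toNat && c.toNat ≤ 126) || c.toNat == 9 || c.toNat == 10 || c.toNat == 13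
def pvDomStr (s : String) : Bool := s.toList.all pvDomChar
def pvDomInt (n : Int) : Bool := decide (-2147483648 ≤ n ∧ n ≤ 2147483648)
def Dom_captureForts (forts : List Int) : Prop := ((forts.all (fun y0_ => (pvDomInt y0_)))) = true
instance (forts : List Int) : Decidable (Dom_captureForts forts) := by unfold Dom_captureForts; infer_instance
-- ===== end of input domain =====

-- B re-implements A's inline state machine as two explicit phases (non-zero index table, then
-- pairwise scan of consecutive entries); same O(n) cost, alternative decomposition.


-- ===== PORT A =====
-- A's for-loop over forts with state (p, ans, t), as structural recursion
def captureFortsLoop : List Int → Int → Int → Int → Int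
  | [], _, ans, _ => ans
  | v :: rest, p, ans, t =>
    if v = 0 then captureFortsLoop rest p ans (t + 1)
    else if v = 1 then captureFortsLoop rest 1 (if p < 0 then max ans t else ans) 0
    else captureFortsLoop rest (-1) (if p > 0 then max ans t else ans) 0

def captureForts (forts : List Int) : Int := captureFortsLoop forts 0 0 0

-- ===== PORT B =====
-- phase 1: [(i, v) for i, v in enumerate(forts) if v != 0]
def nzList : Int → List Int → List (Int × Int)
  | _, [] => []
  | k, v :: rest => if v = 0 then nzList (k + 1) rest else (k, v) :: nzList (k + 1) rest

-- phase 2: for (i,a),(j,b) in zip(nz, nz[1:]): running max of j-i-1 on opposite-sign pairs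
def captureForts_alt (forts : List Int) : Int :=
  let nzl := nzList 0 forts
  (nzl.zip nzl.tail).foldl
    (fun ans pq =>
      if (pq.1.2 == 1) != (pq.2.2 == 1) then max ans (pq.2.1 - pq.1.1 - 1) else ans) 0

-- ===== PRECONDITION & SPEC =====
def Spec_captureForts (forts : List Int) (out : Int) : Prop := out = captureForts_alt forts
instance (forts : List Int) (out : Int) : Decidable (Spec_captureForts forts out) := by unfold Spec_captureForts; infer_instance

-- ===== CLAIM (what is proved, stated in full; the proofs are below) =====
def Claim_equal_captureForts : Prop := ∀ (forts : List Int), Dom_captureForts forts → Spec_captureForts forts (captureForts forts)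

-- ===== LEMMAS AND PROOFS =====

-- right-recursive form of B's pairwise maximum, used as the proof's pivot
def pairMax : List (Int × Int) → Int
  | (i, a) :: (j, b) :: r =>
      max (if (a == 1) != (b == 1) then j - i - 1 else 0) (pairMax ((j, b) :: r))
  | _ => 0

lemma pairMax_nonneg : ∀ l : List (Int × Int), 0 ≤ pairMax l := by
  intro l
  induction l with
  | nil => simp [pairMax]
  | cons x xs ih =>
    cases xs with
    | nil => simp [pairMax]
    | cons y r =>
      obtain ⟨i, a⟩ := x; obtain ⟨j, b⟩ := y
      simp only [pairMax] at ih ⊢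
      omega

-- B's zip-fold equals ans ⊔ pairMax
lemma zipfold_eq (l : List (Int × Int)) : ∀ ans : Int, 0 ≤ ans →
    (l.zip l.tail).foldl
      (fun ans pq =>
        if (pq.1.2 == 1) != (pq.2.2 == 1) then max ans (pq.2.1 - pq.1.1 - 1) else ans) ans
    = max ans (pairMax l) := by
  induction l with
  | nil => intro ans h; simp [pairMax]; omega
  | cons x xs ih =>
    intro ans h
    cases xs with
    | nil => simp [pairMax]; omega
    | cons y r =>
      obtain ⟨i, a⟩ := x; obtain ⟨j, b⟩ := y
      have hnn := pairMax_nonneg ((j, b) :: r)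
      simp only [List.tail_cons] at ih
      simp only [List.tail_cons, List.zip_cons_cons, List.foldl_cons]
      by_cases hop : ((a == 1) != (b == 1)) = true
      · rw [if_pos hop, ih (max ans (j - i - 1)) (by omega)]
        simp only [pairMax, if_pos hop]
        omega
      · rw [if_neg hop, ih ans h]
        simp only [pairMax, if_neg hop]
        omega

-- main invariant: A's loop state (p, ans, t) corresponds to B's pairwise scan with a
-- virtual previous non-zero entry at index k - t - 1 carrying p's sign
lemma main_inv (forts : List Int) : ∀ (k ans t : Int), 0 ≤ ans → 0 ≤ t →
    (captureFortsLoop forts 0 ans t = max ans (pairMax (nzList k forts))) ∧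
    (∀ p b : Int, (p = 1 ∨ p = -1) → (b = 1 ↔ p = 1) →
      captureFortsLoop forts p ans t
        = max ans (pairMax ((k - t - 1, b) :: nzList k forts))) := by
  induction forts with
  | nil =>
    intro k ans t hans ht
    constructor
    · simp [captureFortsLoop, nzList, pairMax]; omega
    · intro p b _ _; simp [captureFortsLoop, nzList, pairMax]; omega
  | cons v rest ih =>
    intro k ans t hans ht
    by_cases hv0 : v = 0
    · subst hv0
      have h1 := ih (k + 1) ans (t + 1) hans (by omega)
      have hk : k + 1 - (t + 1) - 1 = k - t - 1 := by ring
      rw [hk] at h1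
      constructor
      · simpa [captureFortsLoop, nzList] using h1.1
      · intro p b hp hb
        simpa [captureFortsLoop, nzList] using h1.2 p b hp hb
    · by_cases hv1 : v = 1
      · subst hv1
        have h1 := (ih (k + 1) ans 0 hans (by omega)).2 1 1 (Or.inl rfl) (by simp)
        rw [show k + 1 - 0 - 1 = k by ring] at h1
        have hnz : nzList k (1 :: rest) = (k, 1) :: nzList (k + 1) rest := by
          norm_num [nzList]
        have hnn := pairMax_nonneg ((k, 1) :: nzList (k + 1) rest)
        constructor
        · -- p = 0: no pending army
          rw [show captureFortsLoop (1 :: rest) 0 ans t = captureFortsLoop rest 1 ans 0 from by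
            norm_num [captureFortsLoop], h1, hnz]
        · intro p b hp hb
          rcases hp with hp | hp
          · -- p = 1: same sign, candidate is 0 and drops out
            subst hp
            have hb1 : b = 1 := hb.mpr rfl
            subst hb1
            rw [show captureFortsLoop (1 :: rest) 1 ans t = captureFortsLoop rest 1 ans 0 from by
              norm_num [captureFortsLoop], h1, hnz]
            simp only [pairMax]
            norm_num
            omega
          · -- p = -1: opposite signs, candidate is exactly t
            subst hp
            have hbb : (b == (1 : Int)) = false :=
              beq_eq_false_iff_ne.mpr fun h => by simpa using hb.mp h
            have h2 := (ih (k + 1) (max ans t) 0 (by omega) (by omega)).2 1 1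
              (Or.inl rfl) (by simp)
            rw [show k + 1 - 0 - 1 = k by ring] at h2
            rw [show captureFortsLoop (1 :: rest) (-1) ans t
                  = captureFortsLoop rest 1 (max ans t) 0 from by
              norm_num [captureFortsLoop], h2, hnz]
            simp only [pairMax, hbb]
            norm_num
            rw [show k - (k - t - 1) - 1 = t by ring]
      · -- v not in {0, 1}: the else branch, p becomes -1, stored value v has (v == 1) false
        have hvv : (v == (1 : Int)) = false := beq_eq_false_iff_ne.mpr hv1
        have h1 := (ih (k + 1) ans 0 hans (by omega)).2 (-1) v (Or.inr rfl)
          (by constructor <;> intro h <;> simp_all)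
        rw [show k + 1 - 0 - 1 = k by ring] at h1
        have hnz : nzList k (v :: rest) = (k, v) :: nzList (k + 1) rest := by
          simp [nzList, hv0]
        have hnn := pairMax_nonneg ((k, v) :: nzList (k + 1) rest)
        constructor
        · rw [show captureFortsLoop (v :: rest) 0 ans t
                = captureFortsLoop rest (-1) ans 0 from by
            simp [captureFortsLoop, hv0, hv1], h1, hnz]
        · intro p b hp hb
          rcases hp with hp | hp
          · -- p = 1: opposite signs, candidate is exactly t
            subst hp
            have hb1 : b = 1 := hb.mpr rfl
            subst hb1
            have h2 := (ih (k + 1) (max ans t) 0 (by omega) (by omega)).2 (-1) v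
              (Or.inr rfl) (by constructor <;> intro h <;> simp_all)
            rw [show k + 1 - 0 - 1 = k by ring] at h2
            rw [show captureFortsLoop (v :: rest) 1 ans t
                  = captureFortsLoop rest (-1) (max ans t) 0 from by
              simp [captureFortsLoop, hv0, hv1], h2, hnz]
            simp only [pairMax, hvv]
            norm_num
            rw [show k - (k - t - 1) - 1 = t by ring]
          · -- p = -1: same sign, candidate is 0 and drops out
            subst hp
            have hbb : (b == (1 : Int)) = false :=
              beq_eq_false_iff_ne.mpr fun h => by simpa using hb.mp h
            rw [show captureFortsLoop (v :: rest) (-1) ans t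
                  = captureFortsLoop rest (-1) ans 0 from by
              simp [captureFortsLoop, hv0, hv1], h1, hnz]
            simp only [pairMax, hvv, hbb]
            norm_num
            omega

-- ===== VERDICT (by name: the statement is the Claim_ definition above) =====
theorem captureForts_spec : Claim_equal_captureForts := by
  intro forts _
  unfold Spec_captureForts captureForts captureForts_alt
  rw [zipfold_eq (nzList 0 forts) 0 le_rfl,
    (main_inv forts 0 0 0 le_rfl le_rfl).1]
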